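-- pv_equiv track=rewrite | github.com/nikolabebic95/PythonLoopOptimizer | outputs/recursive.py | f
-- ===== SOURCE A (Python) =====
-- def f(n):
--     if n == 0:
--         return 0
--     if n == 1:
--         return 1
--     s = 0
--     for i in range(n):
--         s += f(i)
--     return s
-- ===== SOURCE B (Python) =====
-- def f(n):
--     if n <= 0:
--         return 0
--     if n == 1:
--         return 1
--     return 1 << (n - 2)
-- ===== Notes on version B (the rewrite author's own statement) =====
-- stated objective: alternative
-- what changed: Replaced the exponential double recursion (f recomputed from scratch for every smaller argument) with the closed form: a single power of two for arguments at least two, with the small cases kept as direct base cases; intended as faster, but a timing run could not confirm it since A does not finish on larger inputs.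
import Mathlib
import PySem

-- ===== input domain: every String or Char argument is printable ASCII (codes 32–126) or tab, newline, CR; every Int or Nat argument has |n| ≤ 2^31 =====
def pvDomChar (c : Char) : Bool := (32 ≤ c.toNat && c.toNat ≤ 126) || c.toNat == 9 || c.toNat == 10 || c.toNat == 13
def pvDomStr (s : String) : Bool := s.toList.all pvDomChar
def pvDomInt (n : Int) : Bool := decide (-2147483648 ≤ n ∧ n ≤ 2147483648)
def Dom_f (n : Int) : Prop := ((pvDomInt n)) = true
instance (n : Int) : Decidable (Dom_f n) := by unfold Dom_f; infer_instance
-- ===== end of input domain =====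

-- B replaces A's exponential double recursion by a closed-form power of two (alternative algorithm).

-- ===== PORT A =====
def f (n : Int) : Int :=
  if n == 0 then 0
  else if n == 1 then 1
  else (PySem.List.pyRange 0 n 1).attach.foldl (fun s i => s + f i.1) 0
termination_by n.toNat
decreasing_by
  rename_i i
  have h := (PySem.List.mem_pyRange_one).mp i.2
  omega

-- ===== PORT B =====
def f_alt (n : Int) : Int :=
  if n ≤ 0 then 0
  else if n == 1 then 1
  else 2 ^ (n - 2).toNat

-- ===== PRECONDITION & SPEC =====
def Spec_f (n : Int) (out : Int) : Prop := out = f_alt n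
instance (n : Int) (out : Int) : Decidable (Spec_f n out) := by unfold Spec_f; infer_instance

-- ===== CLAIM (what is proved, stated in full; the proofs are below) =====
def Claim_equal_f : Prop := ∀ (n : Int), Dom_f n → Spec_f n (f n)

-- ===== LEMMAS AND PROOFS =====

theorem f_sum_def (n : Int) (h0 : ¬ n = 0) (h1 : ¬ n = 1) :
    f n = (PySem.List.pyRange 0 n 1).foldl (fun s i => s + f i) 0 := by
  rw [f]
  simp [h0, h1, List.foldl_attach]

theorem f_neg (n : Int) (h : n < 0) : f n = 0 := by
  rw [f_sum_def n (by omega) (by omega), PySem.List.pyRange_one_eq_nil (by omega)]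
  rfl

theorem f_zero : f 0 = 0 := by rw [f]; rfl

theorem f_one : f 1 = 1 := by rw [f]; rfl

theorem f_two : f 2 = 1 := by
  rw [f_sum_def 2 (by omega) (by omega)]
  have h : PySem.List.pyRange 0 2 1 = [0, 1] := by decide
  rw [h]
  simp [List.foldl, f_zero, f_one]

theorem f_step (n : Int) (h2 : 2 ≤ n) : f (n + 1) = f n + f n := by
  rw [f_sum_def (n + 1) (by omega) (by omega),
      PySem.List.pyRange_one_succ_right (by omega : (0:Int) ≤ n),
      List.foldl_append, ← f_sum_def n (by omega) (by omega)]
  rfl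

theorem f_closed (n : Int) (h2 : 2 ≤ n) : f n = 2 ^ (n - 2).toNat := by
  induction n, h2 using Int.le_induction with
  | base => simpa using f_two
  | succ m hm ih =>
      rw [f_step m hm, ih]
      have : (m + 1 - 2).toNat = (m - 2).toNat + 1 := by omega
      rw [this, pow_succ]
      ring

-- ===== VERDICT (by name: the statement is the Claim_ definition above) =====
theorem f_spec : Claim_equal_f := by
  intro n _
  unfold Spec_f f_alt
  by_cases hle : n ≤ 0
  · rcases lt_or_eq_of_le hle with hlt | heq
    · simp [hle, f_neg n hlt]
    · simp [hle, heq.symm ▸ f_zero, ← heq, f_zero]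
  · by_cases h1 : n = 1
    · simp [hle, h1, f_one]
    · have h2 : 2 ≤ n := by omega
      simp [hle, h1, f_closed n h2]
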